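-- pv_equiv track=rewrite | github.com/CyberJutsu/Challenge-Writeups | DF Cyber Defense 2025/online/4-reverse-recovery/solution/scripts/solve.py | pick_flag_part1
-- ===== SOURCE A (Python) =====
-- from typing import Dict, Iterable, List, Optional, Tuple
--
-- def pick_flag_part1(bodies: Iterable[str]) -> Optional[str]:
--     best = None
--     for s in bodies:
--         t = s.strip()
--         if not t:
--             continue
--         if "DF25{" in t or "flag part 1" in t.lower():
--             return t
--         best = best or t
--     return best
-- ===== SOURCE B (Python) =====
-- def pick_flag_part1(bodies):
--     # Right-to-left fold: walk the materialized list backwards, keeping a tagged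
--     # state ("M", t) = leftmost marker seen so far, ("P", t) = leftmost nonempty.
--     res = None
--     for s in reversed(list(bodies)):
--         t = s.strip()
--         if not t:
--             continue
--         if "DF25{" in t or "flag part 1" in t.lower():
--             res = ("M", t)
--         elif res is None or res[0] != "M":
--             res = ("P", t)
--     return res[1] if res is not None else None
-- ===== Notes on version B (the rewrite author's own statement) =====
-- stated objective: alternative
-- what changed: A's forward loop with early return and a 'best' accumulator is replaced by a single backwards (right-to-left) fold over the materialized list, maintaining a tagged state Marked/Plain so the leftmost marker, else leftmost nonempty, survives at the end.
import Mathlib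
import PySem

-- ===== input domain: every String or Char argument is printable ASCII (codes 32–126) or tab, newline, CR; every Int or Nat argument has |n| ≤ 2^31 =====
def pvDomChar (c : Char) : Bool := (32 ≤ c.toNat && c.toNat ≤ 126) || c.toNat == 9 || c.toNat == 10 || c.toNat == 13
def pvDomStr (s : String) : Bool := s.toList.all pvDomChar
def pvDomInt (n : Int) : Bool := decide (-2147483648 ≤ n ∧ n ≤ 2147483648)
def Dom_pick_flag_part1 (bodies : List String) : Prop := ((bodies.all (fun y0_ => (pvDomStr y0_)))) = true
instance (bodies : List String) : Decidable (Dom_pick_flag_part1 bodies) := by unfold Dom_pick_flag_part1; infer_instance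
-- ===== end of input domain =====

-- B replaces A's forward early-return loop with a backwards fold carrying a tagged Marked/Plain state (objective: alternative; return value only).


-- ===== PORT A =====
-- loop over bodies threading the 'best' accumulator; 'best or t' uses Python truthiness (None and "" are falsy)
def pick_flag_part1_loop (best : Option String) : List String → Option String
  | [] => best
  | s :: rest =>
    let t := PySem.Str.strip s
    if t = "" then pick_flag_part1_loop best rest
    else if PySem.Str.isIn "DF25{" t || PySem.Str.isIn "flag part 1" (PySem.Str.lower t) then
      some t
    else
      pick_flag_part1_loop (if best = none ∨ best = some "" then some t else best) rest

def pick_flag_part1 (bodies : List String) : Option String :=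
  pick_flag_part1_loop none bodies

-- ===== PORT B =====
-- one step of B's backwards loop: res is ('M', t) (marker seen) or ('P', t) (leftmost nonempty so far)
def pick_flag_part1_alt_step (res : Option (Bool × String)) (s : String) : Option (Bool × String) :=
  let t := PySem.Str.strip s
  if t = "" then res
  else if PySem.Str.isIn "DF25{" t || PySem.Str.isIn "flag part 1" (PySem.Str.lower t) then
    some (true, t)
  else if res = none ∨ (res.map Prod.fst ≠ some true) then
    some (false, t)
  else res

def pick_flag_part1_alt (bodies : List String) : Option String :=
  let res := bodies.reverse.foldl pick_flag_part1_alt_step none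
  match res with
  | some (_, t) => some t
  | none => none

-- ===== PRECONDITION & SPEC =====
def Spec_pick_flag_part1 (bodies : List String) (out : Option String) : Prop := out = pick_flag_part1_alt bodies
instance (bodies : List String) (out : Option String) : Decidable (Spec_pick_flag_part1 bodies out) := by unfold Spec_pick_flag_part1; infer_instance

-- ===== CLAIM (what is proved, stated in full; the proofs are below) =====
def Claim_equal_pick_flag_part1 : Prop := ∀ (bodies : List String), Dom_pick_flag_part1 bodies → Spec_pick_flag_part1 bodies (pick_flag_part1 bodies)

-- ===== LEMMAS AND PROOFS =====

-- the marker predicate and the stripped-nonempty list both programs are about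
def pvMarker (t : String) : Bool :=
  PySem.Str.isIn "DF25{" t || PySem.Str.isIn "flag part 1" (PySem.Str.lower t)

def pvItems (bodies : List String) : List String :=
  (bodies.map PySem.Str.strip).filter (fun t => t ≠ "")

-- A's loop invariant: equals marker-scan, else best, else first item
theorem pick_flag_part1_loop_eq (bodies : List String) (best : Option String)
    (h : best ≠ some "") :
    pick_flag_part1_loop best bodies =
      match (pvItems bodies).find? pvMarker with
      | some t => some t
      | none => match best with
        | some b => some b
        | none => (pvItems bodies).head? := by
  induction bodies generalizing best with
  | nil =>
    simp [pick_flag_part1_loop, pvItems]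
    cases best with
    | none => rfl
    | some b => rfl
  | cons s rest ih =>
    simp only [pick_flag_part1_loop]
    by_cases ht : PySem.Str.strip s = ""
    · rw [if_pos ht]
      rw [ih best h]
      simp [pvItems, ht]
    · rw [if_neg ht]
      have hitems : pvItems (s :: rest) = PySem.Str.strip s :: pvItems rest := by
        simp [pvItems, ht]
      by_cases hm : pvMarker (PySem.Str.strip s) = true
      · have hm2 := hm
        simp only [pvMarker] at hm2
        rw [hitems]
        simp only [List.find?_cons, hm]
        rw [if_pos hm2]
      · have hm2 := hm
        simp only [pvMarker] at hm2
        rw [if_neg hm2]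
        rw [hitems]
        simp only [List.find?_cons, hm]
        cases best with
        | none =>
          rw [if_pos (Or.inl rfl)]
          rw [ih (some (PySem.Str.strip s)) (by simpa using ht)]
          cases hf : (pvItems rest).find? pvMarker <;> simp
        | some b =>
          have hb : b ≠ "" := fun hb' => h (by rw [hb'])
          rw [if_neg (by simp [hb])]
          rw [ih (some b) h]

-- B's backwards fold, characterized the same way (foldl over the reverse = foldr)
theorem pick_flag_part1_alt_fold_eq (bodies : List String) :
    bodies.foldr (fun s acc => pick_flag_part1_alt_step acc s) none =
      match (pvItems bodies).find? pvMarker with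
      | some t => some (true, t)
      | none => match (pvItems bodies).head? with
        | some t => some (false, t)
        | none => none := by
  induction bodies with
  | nil => simp [pvItems]
  | cons s rest ih =>
    rw [List.foldr_cons, ih]
    by_cases ht : PySem.Str.strip s = ""
    · have hitems : pvItems (s :: rest) = pvItems rest := by simp [pvItems, ht]
      rw [hitems]
      simp only [pick_flag_part1_alt_step]
      rw [if_pos ht]
    · have hitems : pvItems (s :: rest) = PySem.Str.strip s :: pvItems rest := by
        simp [pvItems, ht]
      rw [hitems]
      simp only [pick_flag_part1_alt_step]
      rw [if_neg ht]
      by_cases hm : pvMarker (PySem.Str.strip s) = true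
      · have hm2 := hm; simp only [pvMarker] at hm2
        rw [if_pos hm2]
        simp [hm]
      · have hm2 := hm; simp only [pvMarker] at hm2
        rw [if_neg hm2]
        simp only [List.find?_cons, hm, List.head?_cons]
        cases hf : (pvItems rest).find? pvMarker with
        | some m => simp
        | none => cases hh : (pvItems rest).head? with
          | some u => simp
          | none => simp

-- ===== VERDICT (by name: the statement is the Claim_ definition above) =====
theorem pick_flag_part1_spec : Claim_equal_pick_flag_part1 := by
  intro bodies _
  show pick_flag_part1 bodies = pick_flag_part1_alt bodies
  rw [pick_flag_part1, pick_flag_part1_loop_eq bodies none (by simp)]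
  simp only [pick_flag_part1_alt]
  rw [List.foldl_reverse, pick_flag_part1_alt_fold_eq]
  cases hf : (pvItems bodies).find? pvMarker with
  | some t => rfl
  | none => cases hh : (pvItems bodies).head? <;> rfl
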